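-- pv_equiv track=rewrite | github.com/PhilippePerret/SceneDetector | xTrash/analyze_film.py | format_dialogue_block
-- ===== SOURCE A (Python) =====
-- def format_dialogue_block(dialogues, speakers):
--     """Formate un bloc de dialogue sans répétitions de locuteurs"""
--     if not dialogues:
--         return ''
--
--     formatted_lines = []
--     last_speaker = None
--
--     for i, dialogue in enumerate(dialogues):
--         speaker = speakers[i] if i < len(speakers) else 'INCONNU'
--
--         if speaker != last_speaker:
--             # Nouveau locuteur, l'afficher
--             formatted_lines.append(f"{speaker}: {dialogue}")
--             last_speaker = speaker
--         else:
--             # Même locuteur, pas de répétition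
--             formatted_lines.append(f"  {dialogue}")
--
--     return '\n'.join(formatted_lines)
-- ===== SOURCE B (Python) =====
-- def format_dialogue_block(dialogues, speakers):
--     """Formate un bloc de dialogue sans repetitions de locuteurs."""
--     padded = speakers[:len(dialogues)] + ['INCONNU'] * (len(dialogues) - len(speakers))
--     pairs = list(zip(dialogues, padded))
--     lines = []
--     i = 0
--     while i < len(pairs):
--         # find the end of the run of consecutive lines by the same speaker
--         j = i + 1
--         while j < len(pairs) and pairs[j][1] == pairs[i][1]:
--             j += 1
--         dlg, spk = pairs[i]
--         lines.append(f"{spk}: {dlg}")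
--         for dlg2, _ in pairs[i + 1:j]:
--             lines.append(f"  {dlg2}")
--         i = j
--     return "\n".join(lines)
-- ===== Notes on version B (the rewrite author's own statement) =====
-- stated objective: alternative
-- what changed: Instead of a stateful scan carrying a last_speaker accumulator, B pads the speakers to the dialogue count up front, zips the two lists, splits the pair list into maximal runs of consecutive equal speakers, and renders each run as a header line plus indented continuation lines.
import Mathlib
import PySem

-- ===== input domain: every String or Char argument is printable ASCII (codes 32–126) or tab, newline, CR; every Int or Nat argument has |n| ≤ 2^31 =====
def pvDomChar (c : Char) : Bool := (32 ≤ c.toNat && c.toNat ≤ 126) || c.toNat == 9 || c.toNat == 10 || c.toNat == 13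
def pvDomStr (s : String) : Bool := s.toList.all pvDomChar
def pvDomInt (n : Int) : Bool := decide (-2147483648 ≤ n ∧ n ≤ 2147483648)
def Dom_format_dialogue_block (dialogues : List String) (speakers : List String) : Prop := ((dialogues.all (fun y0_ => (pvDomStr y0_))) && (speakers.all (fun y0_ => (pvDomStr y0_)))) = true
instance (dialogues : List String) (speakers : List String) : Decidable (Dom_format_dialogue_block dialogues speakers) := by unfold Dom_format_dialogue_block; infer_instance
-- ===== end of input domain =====

-- B replaces A's stateful last_speaker scan by pad-zip-group-render; same cost, different decomposition.

-- ===== PORT A =====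
-- literal port of A: loop over enumerate(dialogues) with state (formatted_lines, last_speaker)
def pvStepA (speakers : List String) (st : List String × Option String) (p : Int × String) : List String × Option String :=
  let speaker := if p.1 < (speakers.length : Int) then speakers.getD p.1.toNat "INCONNU" else "INCONNU"
  if some speaker ≠ st.2 then (st.1 ++ [speaker ++ ": " ++ p.2], some speaker)
  else (st.1 ++ ["  " ++ p.2], st.2)

def format_dialogue_block (dialogues : List String) (speakers : List String) : String :=
  if dialogues = [] then "" else
    PySem.Str.join "\n" ((PySem.List.enumerate dialogues 0).foldl (pvStepA speakers) ([], none)).1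

-- ===== PORT B =====
-- speakers padded with 'INCONNU' to the length of dialogues
def pvPad (dialogues : List String) (speakers : List String) : List String :=
  speakers.take dialogues.length ++ List.replicate (dialogues.length - speakers.length) "INCONNU"

-- maximal runs of consecutive pairs with the same speaker (the inner while-scan of Source B)
def pvRuns : List (String × String) → List (List (String × String))
  | [] => []
  | p :: rest =>
    (p :: rest.takeWhile (fun q => q.2 == p.2)) :: pvRuns (rest.dropWhile (fun q => q.2 == p.2))
termination_by l => l.length
decreasing_by
  exact Nat.lt_succ_of_le (List.length_dropWhile_le _ _)

-- one run: header line, then indented continuation lines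
def pvRenderRun : List (String × String) → List String
  | [] => []
  | (d, s) :: t => (s ++ ": " ++ d) :: t.map (fun q => "  " ++ q.1)

def format_dialogue_block_alt (dialogues : List String) (speakers : List String) : String :=
  PySem.Str.join "\n" ((pvRuns ((dialogues.zip (pvPad dialogues speakers)))).flatMap pvRenderRun)

-- ===== PRECONDITION & SPEC =====
def Spec_format_dialogue_block (dialogues : List String) (speakers : List String) (out : String) : Prop := out = format_dialogue_block_alt dialogues speakers
instance (dialogues : List String) (speakers : List String) (out : String) : Decidable (Spec_format_dialogue_block dialogues speakers out) := by unfold Spec_format_dialogue_block; infer_instance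

-- ===== CLAIM (what is proved, stated in full; the proofs are below) =====
def Claim_equal_format_dialogue_block : Prop := ∀ (dialogues : List String) (speakers : List String), Dom_format_dialogue_block dialogues speakers → Spec_format_dialogue_block dialogues speakers (format_dialogue_block dialogues speakers)

-- ===== LEMMAS AND PROOFS =====

-- A's loop body as a pure recursion over (dialogue, speaker) pairs
def pvLoopA : List (String × String) → Option String → List String
  | [], _ => []
  | (d, s) :: rest, last =>
    (if some s ≠ last then s ++ ": " ++ d else "  " ++ d) :: pvLoopA rest (some s)

-- the speaker A selects at index i
def pvSel (speakers : List String) (i : Int) : String :=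
  if i < (speakers.length : Int) then speakers.getD i.toNat "INCONNU" else "INCONNU"

theorem pvStepA_eq (speakers : List String) (st : List String × Option String) (p : Int × String) :
    pvStepA speakers st p
      = if some (pvSel speakers p.1) ≠ st.2 then (st.1 ++ [pvSel speakers p.1 ++ ": " ++ p.2], some (pvSel speakers p.1))
        else (st.1 ++ ["  " ++ p.2], st.2) := rfl

theorem pvFoldA (speakers : List String) (l : List (Int × String)) (acc : List String) (last : Option String) :
    (l.foldl (pvStepA speakers) (acc, last)).1
    = acc ++ pvLoopA (l.map (fun p => (p.2, pvSel speakers p.1))) last := by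
  induction l generalizing acc last with
  | nil => simp [pvLoopA]
  | cons p t ih =>
    rw [List.foldl_cons, List.map_cons, pvStepA_eq, pvLoopA]
    by_cases h : some (pvSel speakers p.1) ≠ last
    · rw [if_pos h, if_pos h, ih]
      simp
    · rw [if_neg h, if_neg h, ih]
      rw [not_not] at h
      rw [← h]
      simp

theorem pvMapEnum (dialogues speakers : List String) :
    (PySem.List.enumerate dialogues 0).map (fun p => (p.2, pvSel speakers p.1))
      = dialogues.zip (pvPad dialogues speakers) := by
  have hlen : (pvPad dialogues speakers).length = dialogues.length := by
    simp [pvPad]; omega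
  apply List.ext_getElem
  · simp [PySem.List.length_enumerate, hlen]
  · intro k h1 h2
    have hk : k < dialogues.length := by
      simpa [PySem.List.length_enumerate] using h1
    have hk' : k < (pvPad dialogues speakers).length := by omega
    rw [List.getElem_map, PySem.List.getElem_enumerate, List.getElem_zip]
    have hpad : (pvPad dialogues speakers)[k] = pvSel speakers ((0 : Int) + k) := by
      by_cases hs : k < speakers.length
      · have htk : k < (speakers.take dialogues.length).length := by simp; omega
        simp only [pvPad]
        rw [List.getElem_append_left htk, List.getElem_take]
        have hcond : ((0 : Int) + k) < (speakers.length : Int) := by omega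
        rw [pvSel, if_pos hcond]
        have h0 : ((0 : Int) + k).toNat = k := by omega
        rw [h0, List.getD_eq_getElem _ _ hs]
      · have htk : ¬ k < (speakers.take dialogues.length).length := by simp; omega
        simp only [pvPad]
        rw [List.getElem_append_right (by simp; omega)]
        have hcond : ¬ (((0 : Int) + k) < (speakers.length : Int)) := by omega
        rw [pvSel, if_neg hcond]
        simp
    rw [hpad]

theorem pvLoopA_decomp (rest : List (String × String)) (s : String) :
    pvLoopA rest (some s)
      = (rest.takeWhile (fun q => q.2 == s)).map (fun q => "  " ++ q.1)
        ++ pvLoopA (rest.dropWhile (fun q => q.2 == s)) none := by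
  induction rest generalizing s with
  | nil => simp [pvLoopA]
  | cons p t ih =>
    obtain ⟨d', s'⟩ := p
    by_cases h : s' = s
    · subst h
      simp [pvLoopA, ih]
    · have hne : (s' == s) = false := by simp [h]
      simp [pvLoopA, hne, h]

theorem pvLoopA_runs (pairs : List (String × String)) :
    pvLoopA pairs none = (pvRuns pairs).flatMap pvRenderRun := by
  induction pairs using pvRuns.induct with
  | case1 => simp [pvLoopA, pvRuns]
  | case2 p rest ih =>
    obtain ⟨d, s⟩ := p
    rw [pvRuns]
    simp only [List.flatMap_cons, pvRenderRun, ← ih]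
    simp [pvLoopA, pvLoopA_decomp]

theorem format_dialogue_block_eq (dialogues speakers : List String) :
    format_dialogue_block dialogues speakers = format_dialogue_block_alt dialogues speakers := by
  unfold format_dialogue_block format_dialogue_block_alt
  by_cases hd : dialogues = []
  · subst hd
    simp [pvRuns, PySem.Str.join]
  · rw [if_neg hd, pvFoldA, pvMapEnum, pvLoopA_runs]
    simp

-- ===== VERDICT (by name: the statement is the Claim_ definition above) =====
theorem format_dialogue_block_spec : Claim_equal_format_dialogue_block := by
  intro dialogues speakers _
  exact format_dialogue_block_eq dialogues speakers
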